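-- pv_equiv track=rewrite | github.com/medspacy/medspacyV | helper/annotations.py | find_sentence_number
-- ===== SOURCE A (Python) =====
-- def find_sentence_number(text, char_index):
--     """
--     Determines the sentence number and character offset for a given index in text.
--
--     Args:
--         text (str): The full document text.
--         char_index (int): The character index to locate.
--
--     Returns:
--         tuple: (Sentence number, character offset before the sentence).
--     """
--     # Split the text into sentences based on newline characters (\n)
--     sentences = text.split("\n")
--
--     # Initialize variables to track the current character index, sentence number,
--     # and the number of characters until the last sentence before the target sentence
--     current_index = 0
--     sentence_number = 0
--     chars_until_previous_sentence = 0
--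
--     # Iterate through each sentence
--     for sentence in sentences:
--         # Update the current character index
--         current_index += len(sentence) + 1  # Add 1 for the newline character
--
--         # Check if the character index falls within the current sentence
--         if char_index < current_index:
--             # Return the sentence number (0-based indexing) and the number of characters until the last sentence before the target sentence
--             return sentence_number+1, chars_until_previous_sentence
--
--         # Update the number of characters until the last sentence before the target sentence
--         chars_until_previous_sentence = current_index
--
--         # Increment the sentence number for the next iteration
--         sentence_number += 1
--
--     # If the character index exceeds the total length of the text, return -1
--     return -1, -1  # Indicates that the character index is out of bounds
-- ===== SOURCE B (Python) =====
-- def find_sentence_number(text, char_index):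
--     """
--     Determines the sentence number and character offset for a given index in text.
--
--     Same result as the loop version, but computed directly on the prefix
--     text[:char_index]: the sentence number is one more than the number of
--     newlines in that prefix, and the offset is the position just after the
--     last newline in it.
--     """
--     if char_index > len(text):
--         return -1, -1  # character index out of bounds
--     prefix = text[:char_index] if char_index > 0 else ""
--     return prefix.count("\n") + 1, prefix.rfind("\n") + 1
-- ===== Notes on version B (the rewrite author's own statement) =====
-- stated objective: simpler
-- what changed: Replaces the split-into-sentences accumulator loop by two direct prefix scans: sentence number = newline count in text[:char_index] plus 1, offset = position after the last newline there, with a single out-of-bounds guard.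
import Mathlib
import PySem

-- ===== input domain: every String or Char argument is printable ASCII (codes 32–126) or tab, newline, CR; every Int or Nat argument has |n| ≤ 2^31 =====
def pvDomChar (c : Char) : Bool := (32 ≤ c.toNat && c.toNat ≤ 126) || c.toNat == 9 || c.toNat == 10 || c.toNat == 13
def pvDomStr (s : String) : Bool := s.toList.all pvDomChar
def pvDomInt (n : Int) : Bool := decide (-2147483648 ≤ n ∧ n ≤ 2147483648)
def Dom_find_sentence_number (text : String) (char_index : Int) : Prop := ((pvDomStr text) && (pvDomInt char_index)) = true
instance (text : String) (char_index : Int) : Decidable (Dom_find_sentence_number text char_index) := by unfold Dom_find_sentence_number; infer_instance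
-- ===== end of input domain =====

-- B replaces A's split-and-accumulate loop by two direct prefix scans (newline count and last-newline
-- position in text[:char_index]) behind one out-of-bounds guard; simpler, same O(n) cost.


-- ===== PORT A =====
-- the 'for sentence in sentences' loop; state = (current_index, sentence_number, chars_until_previous_sentence)
def pvLoopA : List (List Char) → Int → Int → Int → Int → Int × Int
  | [], _, _, _, _ => (-1, -1)
  | s :: rest, char_index, current_index, sentence_number, chars_until_previous_sentence =>
      let current_index' := current_index + (s.length : Int) + 1
      if char_index < current_index' then (sentence_number + 1, chars_until_previous_sentence)
      else pvLoopA rest char_index current_index' (sentence_number + 1) current_index'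

def find_sentence_number (text : String) (char_index : Int) : Int × Int :=
  pvLoopA (PySem.Chars.splitOn text.toList ['\n']) char_index 0 0 0

-- ===== PORT B =====
def find_sentence_number_alt (text : String) (char_index : Int) : Int × Int :=
  if char_index > PySem.Str.len text then (-1, -1)
  else
    let pfx := if char_index > 0 then PySem.Str.slice text none (some char_index) else ""
    ((PySem.Str.count pfx "\n" : Int) + 1, PySem.Str.rfind pfx "\n" + 1)

-- ===== PRECONDITION & SPEC =====
def Spec_find_sentence_number (text : String) (char_index : Int) (out : Int × Int) : Prop := out = find_sentence_number_alt text char_index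
instance (text : String) (char_index : Int) (out : Int × Int) : Decidable (Spec_find_sentence_number text char_index out) := by unfold Spec_find_sentence_number; infer_instance

-- ===== CLAIM (what is proved, stated in full; the proofs are below) =====
def Claim_equal_find_sentence_number : Prop := ∀ (text : String) (char_index : Int), Dom_find_sentence_number text char_index → Spec_find_sentence_number text char_index (find_sentence_number text char_index)

-- ===== LEMMAS AND PROOFS =====

-- fuel-free form of PySem.Chars.splitOn with separator ['\n']
def pvSplit : List Char → List Char → List (List Char)
  | [], cur => [cur.reverse]
  | c :: rest, cur => if c = '\n' then cur.reverse :: pvSplit rest [] else pvSplit rest (c :: cur)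

theorem pvSplit_go (fuel : Nat) (l cur : List Char) (acc : List (List Char))
    (h : l.length ≤ fuel) :
    PySem.Chars.splitOn.go ['\n'] fuel l cur acc = acc.reverse ++ pvSplit l cur := by
  induction fuel generalizing l cur acc with
  | zero =>
    have : l = [] := List.length_eq_zero_iff.mp (Nat.le_zero.mp h)
    subst this
    simp [PySem.Chars.splitOn.go, pvSplit]
  | succ n ih =>
    cases l with
    | nil => simp [PySem.Chars.splitOn.go, pvSplit]
    | cons c rest =>
      simp only [PySem.Chars.splitOn.go, pvSplit]
      by_cases hc : c = '\n'
      · subst hc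
        have hp : List.isPrefixOf ['\n'] ('\n' :: rest) = true := by
          simp [List.isPrefixOf]
        rw [if_pos hp, if_pos rfl]
        have hd : List.drop (['\n'] : List Char).length ('\n' :: rest) = rest := by simp
        rw [hd, ih rest [] (cur.reverse :: acc) (by simpa using Nat.le_of_succ_le_succ h)]
        simp
      · have hp : List.isPrefixOf ['\n'] (c :: rest) = false := by
          simp only [List.isPrefixOf, List.isPrefixOf_nil_left, Bool.and_true, beq_iff_eq]
          exact decide_eq_false (fun e => hc e.symm)
        rw [if_neg (by simp [hp]), if_neg hc]
        exact ih rest (c :: cur) acc (by simpa using Nat.le_of_succ_le_succ h)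

theorem splitOn_eq_pvSplit (cs : List Char) :
    PySem.Chars.splitOn cs ['\n'] = pvSplit cs [] := by
  unfold PySem.Chars.splitOn
  simpa using pvSplit_go (cs.length + 1) cs [] [] (by omega)

theorem pvSplit_no_nl (cs cur : List Char) (h : '\n' ∉ cs) :
    pvSplit cs cur = [cur.reverse ++ cs] := by
  induction cs generalizing cur with
  | nil => simp [pvSplit]
  | cons c rest ih =>
    have hc : c ≠ '\n' := fun e => h (e ▸ List.mem_cons_self)
    simp only [pvSplit, if_neg hc]
    rw [ih _ (fun m => h (List.mem_cons_of_mem _ m))]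
    simp

theorem pvSplit_split (a b cur : List Char) (h : '\n' ∉ a) :
    pvSplit (a ++ '\n' :: b) cur = (cur.reverse ++ a) :: pvSplit b [] := by
  induction a generalizing cur with
  | nil => simp [pvSplit]
  | cons c rest ih =>
    have hc : c ≠ '\n' := fun e => h (e ▸ List.mem_cons_self)
    simp only [List.cons_append, pvSplit, if_neg hc]
    rw [ih _ (fun m => h (List.mem_cons_of_mem _ m))]
    simp

theorem first_nl (cs : List Char) (h : '\n' ∈ cs) :
    ∃ a b, cs = a ++ '\n' :: b ∧ '\n' ∉ a := by
  induction cs with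
  | nil => cases h
  | cons c rest ih =>
    by_cases hc : c = '\n'
    · exact ⟨[], rest, by simp [hc], by simp⟩
    · obtain ⟨a, b, rfl, hna⟩ := ih (by
        cases List.mem_cons.mp h with
        | inl e => exact absurd e.symm hc
        | inr m => exact m)
      exact ⟨c :: a, b, rfl, by
        intro m
        cases List.mem_cons.mp m with
        | inl e => exact hc e.symm
        | inr m => exact hna m⟩

-- rfind.go with single-char needle: scan from j downwards
theorem rfind_go_no_nl (p : List Char) (j : Nat) (h : '\n' ∉ p) :
    PySem.Chars.rfind.go p ['\n'] j = -1 := by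
  induction j with
  | zero =>
    rw [PySem.Chars.rfind.go]
    rw [if_neg]
    intro hp
    exact h ((List.isPrefixOf_iff_prefix.mp hp).subset (by simp))
  | succ k ih =>
    rw [PySem.Chars.rfind.go]
    rw [if_neg, ih]
    intro hp
    have m : '\n' ∈ List.drop (k + 1) p := (List.isPrefixOf_iff_prefix.mp hp).subset (by simp)
    exact h (List.mem_of_mem_drop m)

theorem rfind_no_nl (p : List Char) (h : '\n' ∉ p) :
    PySem.Chars.rfind p ['\n'] = -1 := by
  unfold PySem.Chars.rfind
  exact rfind_go_no_nl p p.length h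

theorem rgo_zero (s sub : List Char) :
    PySem.Chars.rfind.go s sub 0 = if sub.isPrefixOf s then 0 else -1 := by
  rw [PySem.Chars.rfind.go.eq_def]

theorem rgo_succ (s sub : List Char) (j : Nat) :
    PySem.Chars.rfind.go s sub (j + 1)
      = if sub.isPrefixOf (s.drop (j + 1)) then ((j : Int) + 1) else PySem.Chars.rfind.go s sub j := by
  rw [PySem.Chars.rfind.go.eq_def]; push_cast; ring_nf

theorem rfind_go_append (a u : List Char) (k : Nat) (hk : k ≤ u.length) :
    PySem.Chars.rfind.go (a ++ '\n' :: u) ['\n'] (a.length + 1 + k)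
      = (a.length : Int) + 1 + PySem.Chars.rfind.go u ['\n'] k := by
  have hdrop : ∀ i : Nat, List.drop (a.length + 1 + i) (a ++ '\n' :: u) = List.drop i u := by
    intro i
    rw [List.drop_append, List.drop_of_length_le (by omega),
        show a.length + 1 + i - a.length = i + 1 by omega]
    simp
  induction k with
  | zero =>
    rw [show a.length + 1 + 0 = a.length + 1 from rfl, rgo_succ, rgo_zero]
    rw [show a.length + 1 = a.length + 1 + 0 from rfl, hdrop 0, List.drop_zero]
    by_cases h0 : List.isPrefixOf ['\n'] u
    · simp [h0]
    · rw [if_neg h0, if_neg h0]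
      have hd0 : List.drop a.length (a ++ '\n' :: u) = '\n' :: u := by
        rw [List.drop_append, List.drop_of_length_le (le_refl _)]
        simp
      cases hm : a.length with
      | zero =>
        rw [rgo_zero]
        rw [if_pos (by rw [show (a ++ '\n' :: u) = List.drop a.length (a ++ '\n' :: u) by rw [hm]; rfl, hd0]; simp [List.isPrefixOf])]
        omega
      | succ m =>
        rw [rgo_succ]
        rw [if_pos (by rw [show m + 1 = a.length by omega, hd0]; simp [List.isPrefixOf])]
        omega
  | succ k ih =>
    rw [show a.length + 1 + (k + 1) = (a.length + 1 + k) + 1 from rfl, rgo_succ,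
        show a.length + 1 + k + 1 = a.length + 1 + (k + 1) from rfl, hdrop (k + 1)]
    rw [rgo_succ u ['\n'] k]
    by_cases h0 : List.isPrefixOf ['\n'] (List.drop (k + 1) u)
    · rw [if_pos h0, if_pos h0]; push_cast; ring
    · rw [if_neg h0, if_neg h0, ih (by omega)]

theorem rfind_append (a u : List Char) :
    PySem.Chars.rfind (a ++ '\n' :: u) ['\n']
      = (a.length : Int) + 1 + PySem.Chars.rfind u ['\n'] := by
  unfold PySem.Chars.rfind
  rw [show (a ++ '\n' :: u).length = a.length + 1 + u.length by simp; omega]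
  exact rfind_go_append a u u.length (le_refl _)

-- count with single-char needle is List.count
theorem count_go_eq (fuel : Nat) (l : List Char) (acc : Nat) (h : l.length ≤ fuel) :
    PySem.Chars.count.go ['\n'] fuel l acc = acc + l.count '\n' := by
  induction fuel generalizing l acc with
  | zero =>
    have : l = [] := List.length_eq_zero_iff.mp (Nat.le_zero.mp h)
    subst this; simp [PySem.Chars.count.go]
  | succ n ih =>
    cases l with
    | nil => simp [PySem.Chars.count.go]
    | cons c rest =>
      simp only [PySem.Chars.count.go]
      by_cases hc : c = '\n'
      · subst hc
        rw [if_pos (by simp [List.isPrefixOf])]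
        simp only [List.length_singleton, List.drop_succ_cons, List.drop_zero]
        rw [ih rest (acc + 1) (by simpa using Nat.le_of_succ_le_succ h)]
        simp [List.count_cons]
        omega
      · rw [if_neg (by
          simp only [List.isPrefixOf, List.isPrefixOf_nil_left, Bool.and_true, beq_iff_eq]
          exact fun e => hc (Eq.symm e))]
        rw [ih rest acc (by simpa using Nat.le_of_succ_le_succ h)]
        simp [List.count_cons, hc]

theorem count_eq_count (p : List Char) :
    PySem.Chars.count p ['\n'] = p.count '\n' := by
  unfold PySem.Chars.count
  have := count_go_eq p.length p 0 (le_refl _)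
  simpa using this

-- main loop characterisation on in-range indices
theorem pvLoop_main : ∀ (n : Nat) (cs : List Char), cs.length ≤ n →
    ∀ (ci cur sn : Int), ci ≤ cur + cs.length →
    pvLoopA (pvSplit cs []) ci cur sn cur
      = (sn + ((cs.take (ci - cur).toNat).count '\n' : Int) + 1,
         cur + PySem.Chars.rfind (cs.take (ci - cur).toNat) ['\n'] + 1) := by
  intro n
  induction n with
  | zero =>
    intro cs hn ci cur sn h2
    have : cs = [] := List.length_eq_zero_iff.mp (Nat.le_zero.mp hn)
    subst this
    simp only [List.length_nil, Nat.cast_zero, add_zero] at h2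
    simp only [pvSplit, List.reverse_nil, List.take_nil]
    rw [pvLoopA, if_pos (by simp; omega)]
    rw [rfind_no_nl [] (by simp)]
    simp
  | succ n ih =>
    intro cs hn ci cur sn h2
    by_cases hmem : '\n' ∈ cs
    · obtain ⟨a, b, rfl, hna⟩ := first_nl cs hmem
      rw [pvSplit_split a b [] hna]
      simp only [List.reverse_nil, List.nil_append]
      rw [pvLoopA]
      by_cases hlt : ci < cur + (a.length : Int) + 1
      · rw [if_pos hlt]
        have ht : (ci - cur).toNat ≤ a.length := by omega
        have hp : (a ++ '\n' :: b).take (ci - cur).toNat = a.take (ci - cur).toNat := by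
          rw [List.take_append, show (ci - cur).toNat - a.length = 0 by omega]
          simp
        have hnp : '\n' ∉ (a ++ '\n' :: b).take (ci - cur).toNat := by
          rw [hp]; intro m; exact hna (List.mem_of_mem_take m)
        rw [rfind_no_nl _ hnp, List.count_eq_zero.mpr hnp]
        simp
      · rw [if_neg hlt]
        have hlen : (a ++ '\n' :: b).length = a.length + 1 + b.length := by simp; omega
        have hblen : b.length ≤ n := by
          rw [hlen] at hn; omega
        have h2' : ci ≤ (cur + a.length + 1) + (b.length : Int) := by
          rw [hlen] at h2; push_cast at h2 ⊢; omega
        rw [ih b hblen ci (cur + (a.length : Int) + 1) (sn + 1) h2']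
        have ht : (ci - cur).toNat = a.length + 1 + (ci - (cur + a.length + 1)).toNat := by omega
        have hp : (a ++ '\n' :: b).take (ci - cur).toNat
            = a ++ '\n' :: b.take (ci - (cur + (a.length : Int) + 1)).toNat := by
          rw [List.take_append, List.take_of_length_le (by omega),
              show (ci - cur).toNat - a.length = (ci - (cur + a.length + 1)).toNat + 1 by omega]
          simp
        rw [hp, rfind_append a _, List.count_append, List.count_cons]
        have hca : a.count '\n' = 0 := List.count_eq_zero.mpr hna
        simp only [Prod.mk.injEq]
        constructor
        · rw [hca]; simp; ring
        · push_cast; ring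
    · rw [pvSplit_no_nl cs [] hmem]
      simp only [List.reverse_nil, List.nil_append]
      rw [pvLoopA, if_pos (by push_cast; omega)]
      have hnp : '\n' ∉ cs.take (ci - cur).toNat := fun m => hmem (List.mem_of_mem_take m)
      rw [rfind_no_nl _ hnp, List.count_eq_zero.mpr hnp]
      simp

-- out-of-range: the loop falls through to (-1, -1)
theorem pvLoop_oob : ∀ (n : Nat) (cs : List Char), cs.length ≤ n →
    ∀ (ci cur sn : Int), cur + cs.length < ci →
    pvLoopA (pvSplit cs []) ci cur sn cur = (-1, -1) := by
  intro n
  induction n with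
  | zero =>
    intro cs hn ci cur sn h
    have : cs = [] := List.length_eq_zero_iff.mp (Nat.le_zero.mp hn)
    subst this
    simp only [List.length_nil, Nat.cast_zero, add_zero] at h
    simp only [pvSplit, List.reverse_nil]
    rw [pvLoopA, if_neg (by simp; omega)]
    rw [pvLoopA]
  | succ n ih =>
    intro cs hn ci cur sn h
    by_cases hmem : '\n' ∈ cs
    · obtain ⟨a, b, rfl, hna⟩ := first_nl cs hmem
      have hlen : (a ++ '\n' :: b).length = a.length + 1 + b.length := by simp; omega
      rw [pvSplit_split a b [] hna]
      simp only [List.reverse_nil, List.nil_append]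
      rw [pvLoopA, if_neg (by rw [hlen] at h; push_cast at h ⊢; omega)]
      exact ih b (by rw [hlen] at hn; omega) ci _ _ (by rw [hlen] at h; push_cast at h ⊢; omega)
    · rw [pvSplit_no_nl cs [] hmem]
      simp only [List.reverse_nil, List.nil_append]
      rw [pvLoopA, if_neg (by push_cast; omega)]
      rw [pvLoopA]

theorem ports_agree (text : String) (char_index : Int) :
    find_sentence_number text char_index = find_sentence_number_alt text char_index := by
  unfold find_sentence_number find_sentence_number_alt
  rw [splitOn_eq_pvSplit]
  have hlen : PySem.Str.len text = (text.toList.length : Int) := rfl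
  by_cases hgt : char_index > PySem.Str.len text
  · rw [if_pos hgt]
    exact pvLoop_oob text.toList.length text.toList (le_refl _) char_index 0 0
      (by rw [hlen] at hgt; omega)
  · rw [if_neg hgt]
    rw [pvLoop_main text.toList.length text.toList (le_refl _) char_index 0 0
      (by rw [hlen] at hgt; omega)]
    by_cases hpos : char_index > 0
    · rw [if_pos hpos]
      have hb : (PySem.Str.slice text none (some char_index)).toList
          = text.toList.take char_index.toNat := by
        rw [PySem.Str.toList_slice, PySem.Chars.slice_eq_listSlice,
            show char_index = ((char_index.toNat : Nat) : Int) by omega,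
            PySem.List.slice_to_natCast]
        simp
        omega
      simp only [PySem.Str.count_eq, PySem.Str.rfind_eq, hb,
        show ("\n" : String).toList = ['\n'] from rfl, count_eq_count,
        show (char_index - 0).toNat = char_index.toNat by omega]
      simp
    · rw [if_neg hpos]
      simp only [PySem.Str.count_eq, PySem.Str.rfind_eq,
        show ("" : String).toList = ([] : List Char) from rfl,
        show ("\n" : String).toList = ['\n'] from rfl, count_eq_count,
        rfind_no_nl [] (by simp),
        show (char_index - 0).toNat = 0 by omega]
      simp
      rw [rfind_no_nl [] (by simp)]
      norm_num

-- ===== VERDICT (by name: the statement is the Claim_ definition above) =====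
theorem find_sentence_number_spec : Claim_equal_find_sentence_number := by
  intro text char_index _
  exact ports_agree text char_index
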